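-- pv_equiv track=rewrite | github.com/RenanBelem/Simple_Encryption_System | main.py | alice_chave_mudanca
-- ===== SOURCE A (Python) =====
-- def alice_chave_mudanca(bobnouce_bobchave):
--     new_key = ""
--
--     for new_letra_por_letra in bobnouce_bobchave:
--
--         if new_letra_por_letra in "poiuytrewqPOIUYTREWQ":
--             new_key = new_key + "%"
--
--         if new_letra_por_letra in "çlkjhgfdsaÇLKJHGFDSA":
--             new_key = new_key + "*"
--
--         if new_letra_por_letra in "mnbvcxzMNBVCXZ":
--             new_key = new_key + "#"
--
--         if new_letra_por_letra in "0987654321":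
--             new_key = new_key + "@"
--
--         if new_letra_por_letra in "!@#$%¨&*()":
--
--             new_key = new_key + "&"
--
--         else:
--
--             new_key = new_key + new_letra_por_letra
--
--     return new_key
-- ===== SOURCE B (Python) =====
-- def alice_chave_mudanca(bobnouce_bobchave):
--     s = bobnouce_bobchave
--     # stage 1: collapse every special character to "&" in one whole-string pass each
--     for c in "!@#$%¨&*()":
--         s = s.replace(c, "&")
--     # stage 2: prefix each group character with its marker, whole-string pass per character
--     for group, marker in (("poiuytrewqPOIUYTREWQ", "%"),
--                           ("çlkjhgfdsaÇLKJHGFDSA", "*"),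
--                           ("mnbvcxzMNBVCXZ", "#"),
--                           ("0987654321", "@")):
--         for c in group:
--             s = s.replace(c, marker + c)
--     return s
-- ===== Notes on version B (the rewrite author's own statement) =====
-- stated objective: faster
-- what changed: Replaced A's single left-to-right Python loop with five per-character membership branches and repeated string concatenation by staged whole-string rewriting: a fixed sequence of str.replace passes that first collapse the special characters to the ampersand marker and then prefix each group character with its group marker (correct because the inserted markers belong to no later pass's needle set).
import Mathlib
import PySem

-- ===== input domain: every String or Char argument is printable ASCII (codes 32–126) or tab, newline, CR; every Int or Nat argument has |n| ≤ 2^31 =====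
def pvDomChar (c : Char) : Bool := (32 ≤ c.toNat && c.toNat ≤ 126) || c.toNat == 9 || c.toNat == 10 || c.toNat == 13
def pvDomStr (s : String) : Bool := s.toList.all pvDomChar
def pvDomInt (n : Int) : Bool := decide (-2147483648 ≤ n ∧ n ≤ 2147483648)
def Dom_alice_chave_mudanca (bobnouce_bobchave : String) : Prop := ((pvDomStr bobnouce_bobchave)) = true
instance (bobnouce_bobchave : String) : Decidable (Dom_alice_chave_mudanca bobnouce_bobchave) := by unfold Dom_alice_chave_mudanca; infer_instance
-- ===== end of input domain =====

set_option maxRecDepth 100000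


-- B replaces A's single per-character classification pass by staged whole-string str.replace passes (specials to '&' first, then marker prefixes); objective: alternative, same result.

-- ===== PORT A =====
-- one iteration of A's loop body: the four marker ifs, then the if/else on the special set
def pvAStep (new_key : List Char) (c : Char) : List Char :=
  let k1 := if c ∈ "poiuytrewqPOIUYTREWQ".toList then new_key ++ ['%'] else new_key
  let k2 := if c ∈ "çlkjhgfdsaÇLKJHGFDSA".toList then k1 ++ ['*'] else k1
  let k3 := if c ∈ "mnbvcxzMNBVCXZ".toList then k2 ++ ['#'] else k2
  let k4 := if c ∈ "0987654321".toList then k3 ++ ['@'] else k3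
  if c ∈ "!@#$%¨&*()".toList then k4 ++ ['&'] else k4 ++ [c]

def alice_chave_mudanca (bobnouce_bobchave : String) : String :=
  String.ofList (bobnouce_bobchave.toList.foldl pvAStep [])

-- ===== PORT B =====
def pvSpecials : List Char := "!@#$%¨&*()".toList

def pvGroups : List (List Char × Char) :=
  [("poiuytrewqPOIUYTREWQ".toList, '%'), ("çlkjhgfdsaÇLKJHGFDSA".toList, '*'),
   ("mnbvcxzMNBVCXZ".toList, '#'), ("0987654321".toList, '@')]

def alice_chave_mudanca_alt (bobnouce_bobchave : String) : String :=
  let s1 := pvSpecials.foldl (fun t c => PySem.Str.replace t (String.ofList [c]) "&") bobnouce_bobchave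
  pvGroups.foldl
    (fun t gm => gm.1.foldl (fun t c => PySem.Str.replace t (String.ofList [c]) (String.ofList [gm.2, c])) t) s1

-- ===== PRECONDITION & SPEC =====
def Spec_alice_chave_mudanca (bobnouce_bobchave : String) (out : String) : Prop := out = alice_chave_mudanca_alt bobnouce_bobchave
instance (bobnouce_bobchave : String) (out : String) : Decidable (Spec_alice_chave_mudanca bobnouce_bobchave out) := by unfold Spec_alice_chave_mudanca; infer_instance

-- ===== CLAIM (what is proved, stated in full; the proofs are below) =====
def Claim_equal_alice_chave_mudanca : Prop := ∀ (bobnouce_bobchave : String), Dom_alice_chave_mudanca bobnouce_bobchave → Spec_alice_chave_mudanca bobnouce_bobchave (alice_chave_mudanca bobnouce_bobchave)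

-- ===== LEMMAS AND PROOFS =====
-- one single-character replace pass, as a per-character flatMap
def pvPass (p : Char × List Char) (l : List Char) : List Char :=
  l.flatMap (fun x => if x = p.1 then p.2 else [x])

def pvRun (ps : List (Char × List Char)) (l : List Char) : List Char :=
  ps.foldl (fun l p => pvPass p l) l

-- all of B's passes, in the order B performs them
def pvPasses : List (Char × List Char) :=
  pvSpecials.map (fun c => (c, ['&'])) ++
  pvGroups.flatMap (fun gm => gm.1.map (fun c => (c, [gm.2, c])))

-- the chunk A's loop body appends for one character
def pvChunk (c : Char) : List Char :=
  (if c ∈ "poiuytrewqPOIUYTREWQ".toList then ['%'] else []) ++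
  (if c ∈ "çlkjhgfdsaÇLKJHGFDSA".toList then ['*'] else []) ++
  (if c ∈ "mnbvcxzMNBVCXZ".toList then ['#'] else []) ++
  (if c ∈ "0987654321".toList then ['@'] else []) ++
  (if c ∈ "!@#$%¨&*()".toList then ['&'] else [c])

def pvAllKeys : List Char :=
  "poiuytrewqPOIUYTREWQ".toList ++ "çlkjhgfdsaÇLKJHGFDSA".toList ++
  "mnbvcxzMNBVCXZ".toList ++ "0987654321".toList ++ "!@#$%¨&*()".toList

theorem pvAStep_eq (acc : List Char) (c : Char) : pvAStep acc c = acc ++ pvChunk c := by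
  unfold pvAStep pvChunk
  split_ifs <;> simp

theorem pv_foldl_A (l acc : List Char) :
    l.foldl pvAStep acc = acc ++ l.flatMap pvChunk := by
  induction l generalizing acc with
  | nil => simp
  | cons c l ih => simp only [List.foldl_cons, List.flatMap_cons]; rw [ih, pvAStep_eq]; simp

-- Chars.replace.go with a single-character needle is exactly pvPass
theorem pv_go_single (c0 : Char) (new : List Char) (l acc : List Char) (fuel : Nat)
    (h : l.length ≤ fuel) :
    PySem.Chars.replace.go [c0] new fuel l acc
      = acc.reverse ++ pvPass (c0, new) l := by
  induction l generalizing acc fuel with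
  | nil => cases fuel <;> simp [PySem.Chars.replace.go, pvPass]
  | cons c t ih =>
    cases fuel with
    | zero => simp at h
    | succ fuel =>
      simp only [List.length_cons, Nat.succ_le_succ_iff] at h
      by_cases hc : c = c0
      · subst hc
        have hpre : List.isPrefixOf [c] (c :: t) = true := by
          simp [List.isPrefixOf]
        simp only [PySem.Chars.replace.go, hpre, if_true, List.length_cons, List.length_nil]
        rw [List.drop_one, List.tail_cons, ih _ _ h]
        simp [pvPass]
      · have hpre : List.isPrefixOf [c0] (c :: t) = false := by
          simp [List.isPrefixOf]
          exact fun he => absurd he.symm hc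
        simp only [PySem.Chars.replace.go, hpre, Bool.false_eq_true, if_false]
        rw [ih _ _ h]
        simp [pvPass, hc]

theorem pv_replace_single (t : String) (c : Char) (r : String) :
    (PySem.Str.replace t (String.ofList [c]) r).toList = pvPass (c, r.toList) t.toList := by
  rw [PySem.Str.toList_replace, String.toList_ofList]
  unfold PySem.Chars.replace
  rw [if_neg (by simp)]
  rw [pv_go_single _ _ _ _ _ (le_refl _)]
  simp

-- a String-level foldl of single-char replaces is pvRun of the corresponding passes
theorem pv_strfold (cs : List Char) (f : Char → String) (t : String) :
    (cs.foldl (fun t c => PySem.Str.replace t (String.ofList [c]) (f c)) t).toList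
      = pvRun (cs.map (fun c => (c, (f c).toList))) t.toList := by
  induction cs generalizing t with
  | nil => simp [pvRun]
  | cons c cs ih =>
    simp only [List.foldl_cons, List.map_cons, pvRun] at *
    rw [ih, pv_replace_single]

theorem pv_run_append (ps qs : List (Char × List Char)) (l : List Char) :
    pvRun (ps ++ qs) l = pvRun qs (pvRun ps l) := by
  simp [pvRun, List.foldl_append]

theorem pv_groupfold (gs : List (List Char × Char)) (t : String) :
    (gs.foldl
      (fun t gm => gm.1.foldl (fun t c => PySem.Str.replace t (String.ofList [c]) (String.ofList [gm.2, c])) t) t).toList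
      = pvRun (gs.flatMap (fun gm => gm.1.map (fun c => (c, [gm.2, c])))) t.toList := by
  induction gs generalizing t with
  | nil => simp [pvRun]
  | cons gm gs ih =>
    simp only [List.foldl_cons, List.flatMap_cons]
    rw [ih, pv_run_append]
    congr 1
    rw [pv_strfold]
    simp only [String.toList_ofList]

theorem pv_alt_eq (s : String) :
    (alice_chave_mudanca_alt s).toList = pvRun pvPasses s.toList := by
  unfold alice_chave_mudanca_alt
  rw [pv_groupfold, pv_strfold]
  have hamp : "&".toList = ['&'] := by decide
  simp only [hamp]
  rw [← pv_run_append]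
  unfold pvPasses
  rfl

theorem pv_pass_append (p : Char × List Char) (l1 l2 : List Char) :
    pvPass p (l1 ++ l2) = pvPass p l1 ++ pvPass p l2 := by
  simp [pvPass]

theorem pv_run_hom (ps : List (Char × List Char)) (l1 l2 : List Char) :
    pvRun ps (l1 ++ l2) = pvRun ps l1 ++ pvRun ps l2 := by
  induction ps generalizing l1 l2 with
  | nil => simp [pvRun]
  | cons p ps ih => simp only [pvRun, List.foldl_cons] at *; rw [pv_pass_append, ih]

theorem pv_run_nil (ps : List (Char × List Char)) : pvRun ps [] = [] := by
  induction ps with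
  | nil => rfl
  | cons p ps ih => simp only [pvRun, List.foldl_cons] at *; simpa [pvPass] using ih

theorem pv_run_flatMap (ps : List (Char × List Char)) (l : List Char) :
    pvRun ps l = l.flatMap (fun c => pvRun ps [c]) := by
  induction l with
  | nil => simp [pv_run_nil]
  | cons c l ih =>
    rw [show (c :: l) = [c] ++ l from rfl, pv_run_hom, ih]
    simp

theorem pv_run_skip (c : Char) (ps : List (Char × List Char)) (h : ∀ p ∈ ps, p.1 ≠ c) :
    pvRun ps [c] = [c] := by
  induction ps with
  | nil => simp [pvRun]
  | cons p ps ih =>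
    simp only [pvRun, List.foldl_cons]
    have h1 : pvPass p [c] = [c] := by
      simp [pvPass, (h p (by simp)).symm]
    rw [h1]
    exact ih (fun q hq => h q (by simp [hq]))

theorem pv_pw_0 : pvRun pvPasses ['p'] = pvChunk 'p' := by decide
theorem pv_pw_1 : pvRun pvPasses ['o'] = pvChunk 'o' := by decide
theorem pv_pw_2 : pvRun pvPasses ['i'] = pvChunk 'i' := by decide
theorem pv_pw_3 : pvRun pvPasses ['u'] = pvChunk 'u' := by decide
theorem pv_pw_4 : pvRun pvPasses ['y'] = pvChunk 'y' := by decide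
theorem pv_pw_5 : pvRun pvPasses ['t'] = pvChunk 't' := by decide
theorem pv_pw_6 : pvRun pvPasses ['r'] = pvChunk 'r' := by decide
theorem pv_pw_7 : pvRun pvPasses ['e'] = pvChunk 'e' := by decide
theorem pv_pw_8 : pvRun pvPasses ['w'] = pvChunk 'w' := by decide
theorem pv_pw_9 : pvRun pvPasses ['q'] = pvChunk 'q' := by decide
theorem pv_pw_10 : pvRun pvPasses ['P'] = pvChunk 'P' := by decide
theorem pv_pw_11 : pvRun pvPasses ['O'] = pvChunk 'O' := by decide
theorem pv_pw_12 : pvRun pvPasses ['I'] = pvChunk 'I' := by decide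
theorem pv_pw_13 : pvRun pvPasses ['U'] = pvChunk 'U' := by decide
theorem pv_pw_14 : pvRun pvPasses ['Y'] = pvChunk 'Y' := by decide
theorem pv_pw_15 : pvRun pvPasses ['T'] = pvChunk 'T' := by decide
theorem pv_pw_16 : pvRun pvPasses ['R'] = pvChunk 'R' := by decide
theorem pv_pw_17 : pvRun pvPasses ['E'] = pvChunk 'E' := by decide
theorem pv_pw_18 : pvRun pvPasses ['W'] = pvChunk 'W' := by decide
theorem pv_pw_19 : pvRun pvPasses ['Q'] = pvChunk 'Q' := by decide
theorem pv_pw_20 : pvRun pvPasses ['ç'] = pvChunk 'ç' := by decide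
theorem pv_pw_21 : pvRun pvPasses ['l'] = pvChunk 'l' := by decide
theorem pv_pw_22 : pvRun pvPasses ['k'] = pvChunk 'k' := by decide
theorem pv_pw_23 : pvRun pvPasses ['j'] = pvChunk 'j' := by decide
theorem pv_pw_24 : pvRun pvPasses ['h'] = pvChunk 'h' := by decide
theorem pv_pw_25 : pvRun pvPasses ['g'] = pvChunk 'g' := by decide
theorem pv_pw_26 : pvRun pvPasses ['f'] = pvChunk 'f' := by decide
theorem pv_pw_27 : pvRun pvPasses ['d'] = pvChunk 'd' := by decide
theorem pv_pw_28 : pvRun pvPasses ['s'] = pvChunk 's' := by decide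
theorem pv_pw_29 : pvRun pvPasses ['a'] = pvChunk 'a' := by decide
theorem pv_pw_30 : pvRun pvPasses ['Ç'] = pvChunk 'Ç' := by decide
theorem pv_pw_31 : pvRun pvPasses ['L'] = pvChunk 'L' := by decide
theorem pv_pw_32 : pvRun pvPasses ['K'] = pvChunk 'K' := by decide
theorem pv_pw_33 : pvRun pvPasses ['J'] = pvChunk 'J' := by decide
theorem pv_pw_34 : pvRun pvPasses ['H'] = pvChunk 'H' := by decide
theorem pv_pw_35 : pvRun pvPasses ['G'] = pvChunk 'G' := by decide
theorem pv_pw_36 : pvRun pvPasses ['F'] = pvChunk 'F' := by decide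
theorem pv_pw_37 : pvRun pvPasses ['D'] = pvChunk 'D' := by decide
theorem pv_pw_38 : pvRun pvPasses ['S'] = pvChunk 'S' := by decide
theorem pv_pw_39 : pvRun pvPasses ['A'] = pvChunk 'A' := by decide
theorem pv_pw_40 : pvRun pvPasses ['m'] = pvChunk 'm' := by decide
theorem pv_pw_41 : pvRun pvPasses ['n'] = pvChunk 'n' := by decide
theorem pv_pw_42 : pvRun pvPasses ['b'] = pvChunk 'b' := by decide
theorem pv_pw_43 : pvRun pvPasses ['v'] = pvChunk 'v' := by decide
theorem pv_pw_44 : pvRun pvPasses ['c'] = pvChunk 'c' := by decide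
theorem pv_pw_45 : pvRun pvPasses ['x'] = pvChunk 'x' := by decide
theorem pv_pw_46 : pvRun pvPasses ['z'] = pvChunk 'z' := by decide
theorem pv_pw_47 : pvRun pvPasses ['M'] = pvChunk 'M' := by decide
theorem pv_pw_48 : pvRun pvPasses ['N'] = pvChunk 'N' := by decide
theorem pv_pw_49 : pvRun pvPasses ['B'] = pvChunk 'B' := by decide
theorem pv_pw_50 : pvRun pvPasses ['V'] = pvChunk 'V' := by decide
theorem pv_pw_51 : pvRun pvPasses ['C'] = pvChunk 'C' := by decide
theorem pv_pw_52 : pvRun pvPasses ['X'] = pvChunk 'X' := by decide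
theorem pv_pw_53 : pvRun pvPasses ['Z'] = pvChunk 'Z' := by decide
theorem pv_pw_54 : pvRun pvPasses ['0'] = pvChunk '0' := by decide
theorem pv_pw_55 : pvRun pvPasses ['9'] = pvChunk '9' := by decide
theorem pv_pw_56 : pvRun pvPasses ['8'] = pvChunk '8' := by decide
theorem pv_pw_57 : pvRun pvPasses ['7'] = pvChunk '7' := by decide
theorem pv_pw_58 : pvRun pvPasses ['6'] = pvChunk '6' := by decide
theorem pv_pw_59 : pvRun pvPasses ['5'] = pvChunk '5' := by decide
theorem pv_pw_60 : pvRun pvPasses ['4'] = pvChunk '4' := by decide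
theorem pv_pw_61 : pvRun pvPasses ['3'] = pvChunk '3' := by decide
theorem pv_pw_62 : pvRun pvPasses ['2'] = pvChunk '2' := by decide
theorem pv_pw_63 : pvRun pvPasses ['1'] = pvChunk '1' := by decide
theorem pv_pw_64 : pvRun pvPasses ['!'] = pvChunk '!' := by decide
theorem pv_pw_65 : pvRun pvPasses ['@'] = pvChunk '@' := by decide
theorem pv_pw_66 : pvRun pvPasses ['#'] = pvChunk '#' := by decide
theorem pv_pw_67 : pvRun pvPasses ['$'] = pvChunk '$' := by decide
theorem pv_pw_68 : pvRun pvPasses ['%'] = pvChunk '%' := by decide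
theorem pv_pw_69 : pvRun pvPasses ['¨'] = pvChunk '¨' := by decide
theorem pv_pw_70 : pvRun pvPasses ['&'] = pvChunk '&' := by decide
theorem pv_pw_71 : pvRun pvPasses ['*'] = pvChunk '*' := by decide
theorem pv_pw_72 : pvRun pvPasses ['('] = pvChunk '(' := by decide
theorem pv_pw_73 : pvRun pvPasses [')'] = pvChunk ')' := by decide

theorem pv_allKeys_lit : pvAllKeys = ['p', 'o', 'i', 'u', 'y', 't', 'r', 'e', 'w', 'q', 'P', 'O', 'I', 'U', 'Y', 'T', 'R', 'E', 'W', 'Q', 'ç', 'l', 'k', 'j', 'h', 'g', 'f', 'd', 's', 'a', 'Ç', 'L', 'K', 'J', 'H', 'G', 'F', 'D', 'S', 'A', 'm', 'n', 'b', 'v', 'c', 'x', 'z', 'M', 'N', 'B', 'V', 'C', 'X', 'Z', '0', '9', '8', '7', '6', '5', '4', '3', '2', '1', '!', '@', '#', '$', '%', '¨', '&', '*', '(', ')'] := by decide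

set_option maxHeartbeats 2000000 in
theorem pv_passes_keys : ∀ q ∈ pvPasses, q.1 ∈ pvAllKeys := by decide

theorem pv_pointwise (c : Char) : pvRun pvPasses [c] = pvChunk c := by
  by_cases h : c ∈ pvAllKeys
  · rw [pv_allKeys_lit] at h
    simp only [List.mem_cons, List.not_mem_nil, or_false] at h
    rcases h with rfl|rfl|rfl|rfl|rfl|rfl|rfl|rfl|rfl|rfl|rfl|rfl|rfl|rfl|rfl|rfl|rfl|rfl|rfl|rfl|rfl|rfl|rfl|rfl|rfl|rfl|rfl|rfl|rfl|rfl|rfl|rfl|rfl|rfl|rfl|rfl|rfl|rfl|rfl|rfl|rfl|rfl|rfl|rfl|rfl|rfl|rfl|rfl|rfl|rfl|rfl|rfl|rfl|rfl|rfl|rfl|rfl|rfl|rfl|rfl|rfl|rfl|rfl|rfl|rfl|rfl|rfl|rfl|rfl|rfl|rfl|rfl|rfl|rfl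
    · exact pv_pw_0
    · exact pv_pw_1
    · exact pv_pw_2
    · exact pv_pw_3
    · exact pv_pw_4
    · exact pv_pw_5
    · exact pv_pw_6
    · exact pv_pw_7
    · exact pv_pw_8
    · exact pv_pw_9
    · exact pv_pw_10
    · exact pv_pw_11
    · exact pv_pw_12
    · exact pv_pw_13
    · exact pv_pw_14
    · exact pv_pw_15
    · exact pv_pw_16
    · exact pv_pw_17
    · exact pv_pw_18
    · exact pv_pw_19
    · exact pv_pw_20
    · exact pv_pw_21
    · exact pv_pw_22
    · exact pv_pw_23
    · exact pv_pw_24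
    · exact pv_pw_25
    · exact pv_pw_26
    · exact pv_pw_27
    · exact pv_pw_28
    · exact pv_pw_29
    · exact pv_pw_30
    · exact pv_pw_31
    · exact pv_pw_32
    · exact pv_pw_33
    · exact pv_pw_34
    · exact pv_pw_35
    · exact pv_pw_36
    · exact pv_pw_37
    · exact pv_pw_38
    · exact pv_pw_39
    · exact pv_pw_40
    · exact pv_pw_41
    · exact pv_pw_42
    · exact pv_pw_43
    · exact pv_pw_44
    · exact pv_pw_45
    · exact pv_pw_46
    · exact pv_pw_47
    · exact pv_pw_48
    · exact pv_pw_49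
    · exact pv_pw_50
    · exact pv_pw_51
    · exact pv_pw_52
    · exact pv_pw_53
    · exact pv_pw_54
    · exact pv_pw_55
    · exact pv_pw_56
    · exact pv_pw_57
    · exact pv_pw_58
    · exact pv_pw_59
    · exact pv_pw_60
    · exact pv_pw_61
    · exact pv_pw_62
    · exact pv_pw_63
    · exact pv_pw_64
    · exact pv_pw_65
    · exact pv_pw_66
    · exact pv_pw_67
    · exact pv_pw_68
    · exact pv_pw_69
    · exact pv_pw_70
    · exact pv_pw_71
    · exact pv_pw_72
    · exact pv_pw_73
  · rw [pv_run_skip c pvPasses]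
    · simp only [pvAllKeys, List.mem_append, not_or] at h
      obtain ⟨⟨⟨⟨h1, h2⟩, h3⟩, h4⟩, h5⟩ := h
      simp only [pvChunk]
      rw [if_neg h1, if_neg h2, if_neg h3, if_neg h4, if_neg h5]
      simp
    · intro p hp hpc
      apply h
      have := pv_passes_keys p hp
      rwa [hpc] at this

-- ===== VERDICT (by name: the statement is the Claim_ definition above) =====
theorem alice_chave_mudanca_spec : Claim_equal_alice_chave_mudanca := by
  intro s _
  unfold Spec_alice_chave_mudanca
  have h : (alice_chave_mudanca s).toList = (alice_chave_mudanca_alt s).toList := by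
    rw [pv_alt_eq, pv_run_flatMap]
    unfold alice_chave_mudanca
    rw [String.toList_ofList, pv_foldl_A]
    simp only [List.nil_append]
    exact List.flatMap_congr (fun c _ => (pv_pointwise c).symm)
  calc alice_chave_mudanca s = String.ofList (alice_chave_mudanca s).toList := String.ofList_toList.symm
    _ = String.ofList (alice_chave_mudanca_alt s).toList := by rw [h]
    _ = alice_chave_mudanca_alt s := String.ofList_toList
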